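-- pv_equiv track=rewrite | github.com/HITOfficial/College | ASD/Kolokwia/sorts_exercises/longest_incomplete.py | longest_incomplete
-- ===== SOURCE A (Python) =====
-- def binary_find(array,element,left,right):
--     if right >= left:
--         mid = (left+right)//2
--         if array[mid] == element:
--             return True
--         elif array[mid] < element:
--             return binary_find(array,element,mid+1,right)
--         else:
--             return binary_find(array,element,left,mid-1)
--     else:
--         return False
--
-- def longest_incomplete(A,k):
--     n = len(A)
--     # sorting k array, to check later elements in log(k) time
--     k.sort()
--     left, right = 0,len(k)-1
--     longest, actual = 0, 0
--     for i in range(n):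
--         if not binary_find(k,A[i],left,right):
--             actual += 1
--             longest = max(actual,longest)
--         else:
--             actual = 0
--     return longest
-- ===== SOURCE B (Python) =====
-- def longest_incomplete(A, k):
--     # Same return value as A; also preserves A's side effect of sorting k in place.
--     k.sort()
--     present = set(k)
--     flags = [x not in present for x in A]
--     best = 0
--     i = 0
--     n = len(flags)
--     while i < n:
--         if not flags[i]:
--             i += 1
--         else:
--             j = i + 1
--             while j < n and flags[j]:
--                 j += 1
--             best = max(best, j - i)
--             i = j
--     return best
-- ===== Notes on version B (the rewrite author's own statement) =====
-- stated objective: alternative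
-- what changed: Replaces A's per-element recursive binary search and on-the-fly run counters with a hash-set membership flags table followed by an explicit run-by-run scan that maximises over run lengths; k.sort() is kept for its observable side effect.
import Mathlib
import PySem

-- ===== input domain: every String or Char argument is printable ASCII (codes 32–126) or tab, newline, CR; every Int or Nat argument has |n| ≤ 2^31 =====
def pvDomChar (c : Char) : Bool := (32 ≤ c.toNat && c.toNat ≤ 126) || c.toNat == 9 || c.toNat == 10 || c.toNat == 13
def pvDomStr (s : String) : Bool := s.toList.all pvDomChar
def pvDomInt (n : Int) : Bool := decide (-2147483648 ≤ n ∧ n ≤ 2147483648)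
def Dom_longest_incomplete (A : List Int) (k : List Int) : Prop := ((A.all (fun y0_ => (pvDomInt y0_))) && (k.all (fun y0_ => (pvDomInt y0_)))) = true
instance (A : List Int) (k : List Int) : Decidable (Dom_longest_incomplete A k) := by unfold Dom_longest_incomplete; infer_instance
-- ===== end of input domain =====

-- B replaces A's per-element binary search and on-the-fly run counters by a set-membership
-- flags table scanned run by run (objective: alternative decomposition).
-- Both A and B sort k in place; the equivalence proved here is about the return value.

-- ===== PORT A =====
def binary_find (array : List Int) (element : Int) (left right : Int) : Bool :=
  if h : right ≥ left then
    let mid := PySem.Int.floordiv (left + right) 2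
    match PySem.List.pyGet? array mid with
    | some v =>
        if v == element then true
        else if v < element then binary_find array element (mid + 1) right
        else binary_find array element left (mid - 1)
    | none => false   -- Python raises IndexError here; unreachable from longest_incomplete's calls
  else false
termination_by (right - left + 1).toNat
decreasing_by
  · have hb := PySem.Int.floordiv_two_mid_bounds (show left ≤ right from h)
    omega
  · have hb := PySem.Int.floordiv_two_mid_bounds (show left ≤ right from h)
    omega

def longest_incomplete (A : List Int) (k : List Int) : Int :=
  let n := A.length
  let ks := PySem.List.sorted k (fun x => x) false
  let left : Int := 0
  let right : Int := (ks.length : Int) - 1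
  ((PySem.List.pyRange 0 (n : Int) 1).foldl
    (fun (st : Int × Int) i =>
      if !(binary_find ks (PySem.List.pyGetD A i 0) left right) then
        (max (st.2 + 1) st.1, st.2 + 1)    -- actual += 1; longest = max(actual, longest)
      else (st.1, 0))
    (0, 0)).1
  -- A[i]: every index i ∈ range(n) is in range, so pyGetD's default is never used

-- ===== PORT B =====
-- the inner 'while j < n and flags[j]: j += 1' run scan: takeWhile/dropWhile split at j
def altScan (flags : List Bool) (best : Int) : Int :=
  match flags with
  | [] => best
  | false :: rest => altScan rest best
  | true :: rest =>
      altScan (rest.dropWhile (fun b => b))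
        (max best (1 + ((rest.takeWhile (fun b => b)).length : Int)))
termination_by flags.length
decreasing_by
  · simp
  · have := (rest.dropWhile_sublist (p := fun b => b)).length_le
    simp
    omega

def longest_incomplete_alt (A : List Int) (k : List Int) : Int :=
  let ks := PySem.List.sorted k (fun x => x) false
  let present : PySem.Set Int := PySem.Set.ofList ks
  let flags := A.map (fun x => !(PySem.Set.contains present x))
  altScan flags 0

-- ===== PRECONDITION & SPEC =====
def Spec_longest_incomplete (A : List Int) (k : List Int) (out : Int) : Prop := out = longest_incomplete_alt A k
instance (A : List Int) (k : List Int) (out : Int) : Decidable (Spec_longest_incomplete A k out) := by unfold Spec_longest_incomplete; infer_instance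

-- ===== CLAIM (what is proved, stated in full; the proofs are below) =====
def Claim_equal_longest_incomplete : Prop := ∀ (A : List Int) (k : List Int), Dom_longest_incomplete A k → Spec_longest_incomplete A k (longest_incomplete A k)

-- ===== LEMMAS AND PROOFS =====

-- binary_find on a sorted list decides membership of x in the index window [l, r]
theorem bf_aux (ks : List Int) (x : Int) (hs : ks.Pairwise (· ≤ ·)) :
    ∀ (n : Nat) (l r : Int), (r - l + 1).toNat ≤ n → 0 ≤ l → r < (ks.length : Int) →
      (binary_find ks x l r = true ↔
        ∃ i : Nat, l ≤ (i : Int) ∧ (i : Int) ≤ r ∧ ∃ h : i < ks.length, ks[i] = x) := by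
  have hmono : ∀ (i j : Nat) (h1 : i < ks.length) (h2 : j < ks.length), i ≤ j → ks[i] ≤ ks[j] := by
    intro i j h1 h2 hij
    rcases lt_or_eq_of_le hij with h | h
    · exact (List.pairwise_iff_getElem.mp hs) i j h1 h2 h
    · subst h; exact le_refl _
  intro n
  induction n with
  | zero =>
    intro l r hn _ _
    have hrl : ¬ (r ≥ l) := by omega
    rw [binary_find]
    simp only [hrl, dite_false]
    constructor
    · intro h; cases h
    · rintro ⟨i, h1, h2, _⟩; exfalso; omega
  | succ n ih =>
    intro l r hn hl hr
    rw [binary_find]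
    by_cases hge : r ≥ l
    · simp only [hge, dite_true]
      have hmb := PySem.Int.floordiv_two_mid_bounds (show l ≤ r from hge)
      set mid := PySem.Int.floordiv (l + r) 2 with hmid
      have h0m : 0 ≤ mid := le_trans hl hmb.1
      have hmlen : mid < (ks.length : Int) := lt_of_le_of_lt hmb.2 hr
      have hmn : mid.toNat < ks.length := by omega
      rw [PySem.List.pyGet?_eq_some_getElem ks h0m hmlen]
      by_cases hvx : ks[mid.toNat] = x
      · simp only [hvx, beq_self_eq_true, if_true]
        constructor
        · intro _; exact ⟨mid.toNat, by omega, by omega, hmn, hvx⟩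
        · intro _; trivial
      · have hbeq : (ks[mid.toNat] == x) = false := by simp [hvx]
        simp only [hbeq, Bool.false_eq_true, if_false]
        by_cases hlt : ks[mid.toNat] < x
        · simp only [hlt, if_true]
          rw [ih (mid + 1) r (by omega) (by omega) hr]
          constructor
          · rintro ⟨i, h1, h2, hi, hix⟩; exact ⟨i, by omega, h2, hi, hix⟩
          · rintro ⟨i, h1, h2, hi, hix⟩
            refine ⟨i, ?_, h2, hi, hix⟩
            by_contra hcon
            have hle : i ≤ mid.toNat := by omega
            have := hmono i mid.toNat hi hmn hle
            omega
        · simp only [hlt, if_false]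
          have hgt : x < ks[mid.toNat] := by omega
          rw [ih l (mid - 1) (by omega) hl (by omega)]
          constructor
          · rintro ⟨i, h1, h2, hi, hix⟩; exact ⟨i, h1, by omega, hi, hix⟩
          · rintro ⟨i, h1, h2, hi, hix⟩
            refine ⟨i, h1, ?_, hi, hix⟩
            by_contra hcon
            have hle : mid.toNat ≤ i := by omega
            have := hmono mid.toNat i hmn hi hle
            omega
    · simp only [hge, dite_false]
      constructor
      · intro h; cases h
      · rintro ⟨i, h1, h2, _⟩; exfalso; omega

-- the top-level call on a sorted list decides plain membership
theorem binary_find_mem (ks : List Int) (x : Int) (hs : ks.Pairwise (· ≤ ·)) :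
    binary_find ks x 0 ((ks.length : Int) - 1) = decide (x ∈ ks) := by
  have h := bf_aux ks x hs ks.length 0 ((ks.length : Int) - 1) (by omega) le_rfl (by omega)
  have h2 : x ∈ ks ↔ ∃ i : Nat, (0 : Int) ≤ (i : Int) ∧ (i : Int) ≤ (ks.length : Int) - 1 ∧
      ∃ hh : i < ks.length, ks[i] = x := by
    rw [List.mem_iff_getElem]
    constructor
    · rintro ⟨i, hi, hix⟩; exact ⟨i, by omega, by omega, hi, hix⟩
    · rintro ⟨i, _, _, hi, hix⟩; exact ⟨i, hi, hix⟩
  rw [Bool.eq_iff_iff]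
  simp only [decide_eq_true_eq]
  exact h.trans h2.symm

-- altScan restart: altScan absorbs the leading run of trues into its accumulator
theorem altScan_run (rest : List Bool) (l : Int) (hl : 0 ≤ l) :
    altScan rest l =
      altScan (rest.dropWhile (fun b => b))
        (max l (((rest.takeWhile (fun b => b)).length : Int))) := by
  match rest with
  | [] => simp [altScan]; omega
  | false :: t =>
      have h1 : List.dropWhile (fun b => b) (false :: t) = false :: t := by simp
      have h2 : List.takeWhile (fun b => b) (false :: t) = ([] : List Bool) := by simp
      rw [h1, h2]
      simp only [List.length_nil, Nat.cast_zero]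
      rw [max_eq_left hl]
  | true :: t =>
      simp only [altScan, List.dropWhile_cons, List.takeWhile_cons, if_true]
      congr 1
      simp only [List.length_cons]
      push_cast
      omega

-- A's (longest, actual) counter fold equals B's run scan
theorem foldA_eq_altScan (flags : List Bool) (l a : Int) (ha : 0 ≤ a) (hal : a ≤ l) :
    (flags.foldl
      (fun (st : Int × Int) f => if f then (max (st.2 + 1) st.1, st.2 + 1) else (st.1, 0))
      (l, a)).1 =
    altScan (flags.dropWhile (fun b => b))
      (max l (a + ((flags.takeWhile (fun b => b)).length : Int))) := by
  induction flags generalizing l a with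
  | nil => simp [altScan]; omega
  | cons f t ih =>
    cases f with
    | true =>
      simp only [List.foldl_cons, if_true, List.dropWhile_cons, List.takeWhile_cons]
      rw [ih (max (a + 1) l) (a + 1) (by omega) (by omega)]
      congr 1
      simp only [List.length_cons]
      push_cast
      omega
    | false =>
      simp only [List.foldl_cons, Bool.false_eq_true, if_false, List.dropWhile_cons,
        List.takeWhile_cons]
      rw [ih l 0 le_rfl (by omega)]
      simp only [zero_add]
      rw [← altScan_run t l (by omega)]
      simp only [List.length_nil, Nat.cast_zero, add_zero, max_eq_left hal]
      simp [altScan]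

-- ===== VERDICT (by name: the statement is the Claim_ definition above) =====
theorem longest_incomplete_spec : Claim_equal_longest_incomplete := by
  intro A k _dom
  unfold Spec_longest_incomplete longest_incomplete longest_incomplete_alt
  dsimp only
  have hsort : (PySem.List.sorted k (fun x => x) false).Pairwise (· ≤ ·) := by
    simpa using PySem.List.sorted_pairwise (xs := k) (key := fun x => x)
  set ks := PySem.List.sorted k (fun x => x) false with hks
  rw [PySem.List.foldl_pyRange_zero_pyGetD' A 0
    (fun (st : Int × Int) v =>
      if !(binary_find ks v 0 ((ks.length : Int) - 1)) then
        (max (st.2 + 1) st.1, st.2 + 1)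
      else (st.1, 0)) (0, 0)]
  have hfm : A.foldl
      (fun (st : Int × Int) v =>
        if !(binary_find ks v 0 ((ks.length : Int) - 1)) then
          (max (st.2 + 1) st.1, st.2 + 1)
        else (st.1, 0)) (0, 0)
      = (A.map (fun v => !(binary_find ks v 0 ((ks.length : Int) - 1)))).foldl
        (fun (st : Int × Int) f => if f then (max (st.2 + 1) st.1, st.2 + 1) else (st.1, 0))
        (0, 0) := by
    rw [List.foldl_map]
  rw [hfm]
  have hflag : A.map (fun v => !(binary_find ks v 0 ((ks.length : Int) - 1)))
      = A.map (fun x => !(PySem.Set.contains (PySem.Set.ofList ks) x)) := by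
    apply List.map_congr_left
    intro x _
    rw [binary_find_mem ks x hsort]
    have hc : PySem.Set.contains (PySem.Set.ofList ks) x = decide (x ∈ ks) := by
      rw [Bool.eq_iff_iff]
      simp [PySem.Set.mem_ofList]
    rw [hc]
  rw [hflag]
  rw [foldA_eq_altScan _ 0 0 le_rfl le_rfl]
  simp only [zero_add]
  rw [← altScan_run _ 0 le_rfl]
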